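-- pv_equiv track=rewrite | github.com/James741-j/BUZZHIT_9.2_SDG9 | stress_analyzer.py | estimate_total_cost
-- ===== SOURCE A (Python) =====
-- from typing import Dict, List, Optional, Tuple
--
-- def estimate_total_cost(recommendations: List[Dict]) -> str:
--     """Estimate total implementation cost range"""
--     cost_map = {"$": 1, "$$": 2, "$$$": 3, "$$$$": 4}
--     total_cost_level = sum(cost_map.get(r["estimated_cost"], 2) for r in recommendations)
--
--     if total_cost_level < 5:
--         return "$10,000 - $50,000"
--     elif total_cost_level < 10:
--         return "$50,000 - $250,000"
--     elif total_cost_level < 15: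
--         return "$250,000 - $1,000,000"
--     else:
--         return "$1,000,000+"
-- ===== SOURCE B (Python) =====
-- from typing import Dict, List
--
-- def estimate_total_cost(recommendations: List[Dict]) -> str:
--     """Estimate total implementation cost range"""
--     # Pass 1: histogram of the cost labels (no per-item weight lookup).
--     counts = {}
--     for r in recommendations:
--         c = r["estimated_cost"]
--         counts[c] = counts.get(c, 0) + 1
--     # Pass 2: weighted sum over the four known labels; everything else weighs 2.
--     known = {"$": 1, "$$": 2, "$$$": 3, "$$$$": 4}
--     recognized = sum(counts.get(s, 0) for s in known)
--     total = sum(w * counts.get(s, 0) for s, w in known.items())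
--     total += 2 * (len(recommendations) - recognized)
--     # Table-driven bucket scan instead of an if/elif cascade.
--     for bound, label in ((5, "$10,000 - $50,000"),
--                          (10, "$50,000 - $250,000"),
--                          (15, "$250,000 - $1,000,000")):
--         if total < bound:
--             return label
--     return "$1,000,000+"
-- ===== Notes on version B (the rewrite author's own statement) =====
-- stated objective: alternative
-- what changed: B first builds a histogram of the cost labels, then computes the total as a weighted sum over the four known labels plus 2 per unrecognized record, and selects the bucket by scanning a (bound, label) table instead of an if/elif cascade.
import Mathlib
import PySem

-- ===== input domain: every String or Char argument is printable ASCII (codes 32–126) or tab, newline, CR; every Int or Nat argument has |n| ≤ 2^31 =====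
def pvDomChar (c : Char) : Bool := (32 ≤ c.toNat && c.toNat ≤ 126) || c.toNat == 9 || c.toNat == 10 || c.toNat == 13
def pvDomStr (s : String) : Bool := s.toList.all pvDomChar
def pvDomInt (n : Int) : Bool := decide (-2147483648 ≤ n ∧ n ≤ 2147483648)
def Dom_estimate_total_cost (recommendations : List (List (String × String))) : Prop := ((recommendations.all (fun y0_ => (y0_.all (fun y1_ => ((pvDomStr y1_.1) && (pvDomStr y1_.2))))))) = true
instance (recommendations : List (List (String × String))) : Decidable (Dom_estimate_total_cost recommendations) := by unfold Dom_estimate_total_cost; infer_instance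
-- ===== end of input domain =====

-- B computes the same total via a label histogram plus a weighted sum over the four
-- known labels, and picks the bucket by scanning a (bound, label) table.

-- ===== PORT A =====
-- cost_map = {"$": 1, "$$": 2, "$$$": 3, "$$$$": 4}
def pvCostMap : PySem.Dict String Int :=
  PySem.Dict.mk [("$", 1), ("$$", 2), ("$$$", 3), ("$$$$", 4)]

-- r["estimated_cost"]; raises KeyError at a missing key — exactly those inputs are
-- excluded by Pre_, so the .getD "" default is never reached there.
def pvKey (r : List (String × String)) : String :=
  (PySem.Dict.mk r).getD "estimated_cost" ""

def estimate_total_cost (recommendations : List (List (String × String))) : String :=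
  let total_cost_level : Int :=
    recommendations.foldl (fun acc r => acc + pvCostMap.getD (pvKey r) 2) 0
  if total_cost_level < 5 then "$10,000 - $50,000"
  else if total_cost_level < 10 then "$50,000 - $250,000"
  else if total_cost_level < 15 then "$250,000 - $1,000,000"
  else "$1,000,000+"

-- ===== PORT B =====
-- the early-returning 'for bound, label in table' loop of Source B
def pvPick : Int → List (Int × String) → String
  | _, [] => "$1,000,000+"
  | t, (b, l) :: rest => if t < b then l else pvPick t rest

def estimate_total_cost_alt (recommendations : List (List (String × String))) : String :=
  let counts : PySem.Dict String Int :=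
    recommendations.foldl
      (fun d r => let c := pvKey r; d.insert c (d.getD c 0 + 1)) PySem.Dict.empty
  let known : List (String × Int) := [("$", 1), ("$$", 2), ("$$$", 3), ("$$$$", 4)]
  let recognized : Int := (known.map (fun p => counts.getD p.1 0)).sum
  let total : Int := (known.map (fun p => p.2 * counts.getD p.1 0)).sum
      + 2 * ((recommendations.length : Int) - recognized)
  pvPick total [(5, "$10,000 - $50,000"), (10, "$50,000 - $250,000"),
                (15, "$250,000 - $1,000,000")]

-- ===== PRECONDITION & SPEC =====
-- Pre_ excludes inputs where some record lacks the key "estimated_cost": there both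
-- Python A and Python B raise KeyError (r["estimated_cost"]).
def Pre_estimate_total_cost (recommendations : List (List (String × String))) : Prop :=
  (recommendations.all (fun r => ((PySem.Dict.mk r).contains "estimated_cost"))) = true
instance (recommendations : List (List (String × String))) : Decidable (Pre_estimate_total_cost recommendations) := by unfold Pre_estimate_total_cost; infer_instance

def pvWitness_estimate_total_cost : (List (List (String × String))) :=
  [[("estimated_cost", "$$")], [("estimated_cost", "$$$$")]]

def Spec_estimate_total_cost (recommendations : List (List (String × String))) (out : String) : Prop := out = estimate_total_cost_alt recommendations
instance (recommendations : List (List (String × String))) (out : String) : Decidable (Spec_estimate_total_cost recommendations out) := by unfold Spec_estimate_total_cost; infer_instance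

-- ===== CLAIM =====
def Claim_equal_estimate_total_cost : Prop := ∀ (recommendations : List (List (String × String))), Dom_estimate_total_cost recommendations → Pre_estimate_total_cost recommendations → Spec_estimate_total_cost recommendations (estimate_total_cost recommendations)

-- ===== LEMMAS AND PROOFS =====

-- the per-record weight as a four-way case split on the label
theorem pvCost_cases (c : String) :
    pvCostMap.getD c 2 =
      if c = "$" then 1 else if c = "$$" then 2 else if c = "$$$" then 3
      else if c = "$$$$" then 4 else 2 := by
  unfold pvCostMap
  split_ifs with h1 h2 h3 h4
  · subst h1; decide
  · subst h2; decide
  · subst h3; decide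
  · subst h4; decide
  · simp only [PySem.Dict.getD_eq_get?_getD, PySem.Dict.get?]
    simp [Ne.symm h1, Ne.symm h2, Ne.symm h3, Ne.symm h4]

-- A's summed weights, expressed through label counts (B's formula)
theorem pvSum_counts (cs : List String) (a : Int) :
    cs.foldl (fun acc c => acc + pvCostMap.getD c 2) a =
      a + (1 * (cs.count "$" : Int) + 2 * (cs.count "$$" : Int)
        + 3 * (cs.count "$$$" : Int) + 4 * (cs.count "$$$$" : Int)
        + 2 * ((cs.length : Int) - ((cs.count "$" : Int) + (cs.count "$$" : Int)
            + (cs.count "$$$" : Int) + (cs.count "$$$$" : Int)))) := by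
  induction cs generalizing a with
  | nil => simp
  | cons c cs ih =>
      simp only [List.foldl_cons, ih, List.count_cons, List.length_cons, pvCost_cases c]
      by_cases h1 : c = "$" <;> by_cases h2 : c = "$$" <;> by_cases h3 : c = "$$$" <;>
        by_cases h4 : c = "$$$$" <;>
        (try simp_all [beq_iff_eq]) <;> (try push_cast) <;> ring

-- ===== VERDICT =====
theorem estimate_total_cost_spec : Claim_equal_estimate_total_cost := by
  intro recs _ _
  unfold Spec_estimate_total_cost estimate_total_cost estimate_total_cost_alt
  have hfold : ∀ (init : PySem.Dict String Int),
      recs.foldl (fun d r => let c := pvKey r; d.insert c (d.getD c 0 + 1)) init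
        = (recs.map pvKey).foldl (fun d c => d.insert c (d.getD c 0 + 1)) init := by
    intro init; rw [List.foldl_map]
  have hA : recs.foldl (fun acc r => acc + pvCostMap.getD (pvKey r) 2) 0
      = (recs.map pvKey).foldl (fun acc c => acc + pvCostMap.getD c 2) 0 := by
    rw [List.foldl_map]
  set cs := recs.map pvKey with hcs
  have hcount : ∀ s : String,
      (recs.foldl (fun d r => let c := pvKey r; d.insert c (d.getD c 0 + 1))
        PySem.Dict.empty).getD s 0 = (cs.count s : Int) := by
    intro s
    rw [hfold, PySem.Dict.getD_foldl_insert_add_one, PySem.Dict.getD_empty]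
    simp
  have hlen : (recs.length : Int) = (cs.length : Int) := by simp [hcs]
  simp only [hA, pvSum_counts cs 0, hcount, List.map_cons, List.map_nil, List.sum_cons,
    List.sum_nil, hlen, zero_add]
  set n1 := (cs.count "$" : Int)
  set n2 := (cs.count "$$" : Int)
  set n3 := (cs.count "$$$" : Int)
  set n4 := (cs.count "$$$$" : Int)
  set t := 1 * n1 + 2 * n2 + 3 * n3 + 4 * n4
      + 2 * ((cs.length : Int) - (n1 + n2 + n3 + n4)) with ht
  have ht' : 1 * n1 + (2 * n2 + (3 * n3 + (4 * n4 + 0)))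
      + 2 * ((cs.length : Int) - (n1 + (n2 + (n3 + (n4 + 0))))) = t := by rw [ht]; ring
  rw [ht']
  simp [pvPick]
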